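-- pv_equiv track=rewrite | github.com/benthebenno/Sampling_Tests | tests.py | hasSameSums
-- ===== SOURCE A (Python) =====
-- def hasSameSums(firstM, secondM):
--     if len(firstM) != len(secondM):
--         return False
--     if len(firstM[0]) != len(secondM[0]):
--         return False
--
--     for x in range(len(firstM)):
--         firstSum = 0
--         secondSum = 0
--         for y in range(len(firstM[0])):
--             firstSum += firstM[x][y]
--             secondSum += secondM[x][y]
--         if firstSum != secondSum:
--             return False
--     for y in range (len(firstM[0])):
--         firstSum = 0
--         secondSum = 0
--         for x in range(len(firstM)):
--             firstSum += firstM[x][y]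
--             secondSum += secondM[x][y]
--         if firstSum != secondSum:
--             return False
--     return True
-- ===== SOURCE B (Python) =====
-- def hasSameSums(firstM, secondM):
--     if len(firstM) != len(secondM):
--         return False
--     if len(firstM[0]) != len(secondM[0]):
--         return False
--     w = len(firstM[0])
--     col = [0] * w
--     for rf, rs in zip(firstM, secondM):
--         ds = [rf[y] - rs[y] for y in range(w)]
--         if sum(ds) != 0:
--             return False
--         col = [c + d for c, d in zip(col, ds)]
--     return all(c == 0 for c in col)
-- ===== Notes on version B (the rewrite author's own statement) =====
-- stated objective: alternative
-- what changed: Instead of A's two staged passes comparing per-row and per-column sums of the two matrices, B makes a single pass over the paired rows of the difference matrix, rejecting a row whose differences do not cancel and accumulating a vector of column residuals that must all end at zero (one traversal of each matrix instead of two); Pre_ excludes the empty/jagged inputs on which A (and B) can raise IndexError, though on a few jagged inputs A still returns False via its early exit.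
-- outside the precondition, e.g. on hasSameSums([[1, 2], [3]], [[9, 9], [0, 0]]): A returns False, B returns False
import Mathlib
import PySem

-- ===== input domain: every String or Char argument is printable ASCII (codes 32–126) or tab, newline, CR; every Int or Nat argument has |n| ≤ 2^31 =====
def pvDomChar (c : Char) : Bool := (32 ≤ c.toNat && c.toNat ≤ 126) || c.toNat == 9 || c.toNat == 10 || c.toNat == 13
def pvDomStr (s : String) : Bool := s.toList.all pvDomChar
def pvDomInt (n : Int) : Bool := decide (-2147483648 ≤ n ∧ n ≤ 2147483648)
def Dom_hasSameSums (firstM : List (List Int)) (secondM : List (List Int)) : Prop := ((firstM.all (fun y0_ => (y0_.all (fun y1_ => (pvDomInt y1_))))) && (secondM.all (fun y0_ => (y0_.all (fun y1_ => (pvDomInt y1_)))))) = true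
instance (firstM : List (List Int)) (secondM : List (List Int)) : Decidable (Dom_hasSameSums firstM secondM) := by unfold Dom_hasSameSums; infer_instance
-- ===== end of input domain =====

-- B replaces A's two staged sum-comparison passes by a single pass over the paired rows of the
-- difference matrix, maintaining a vector of column residuals and checking all residuals are zero.


-- ===== PORT A =====
-- firstM[0] / secondM[0] are ported as .headI: under Pre_ they exist; the early-exit row/column
-- loops become `.all` over the same ranges, each inner loop the same two-accumulator fold.
def hasSameSums (firstM : List (List Int)) (secondM : List (List Int)) : Bool :=
  if firstM.length ≠ secondM.length then false
  else if firstM.headI.length ≠ secondM.headI.length then false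
  else
    let n := firstM.length
    let w := firstM.headI.length
    let rowsOK := (List.range n).all (fun x =>
      let p := (List.range w).foldl
        (fun (acc : Int × Int) y => (acc.1 + (firstM.getD x []).getD y 0,
                                     acc.2 + (secondM.getD x []).getD y 0)) (0, 0)
      p.1 == p.2)
    if ¬ rowsOK then false
    else (List.range w).all (fun y =>
      let p := (List.range n).foldl
        (fun (acc : Int × Int) x => (acc.1 + (firstM.getD x []).getD y 0,
                                     acc.2 + (secondM.getD x []).getD y 0)) (0, 0)
      p.1 == p.2)

-- ===== PORT B =====
-- the for-loop over zip(firstM, secondM) with its early return, carrying the column-residual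
-- vector `col`; per row the difference list `ds`, its sum test, and the zip update of `col`.
def bLoop (w : Nat) (pairs : List (List Int × List Int)) (col : List Int) : Bool :=
  match pairs with
  | [] => col.all (fun c => c == 0)
  | (rf, rs) :: rest =>
    let ds := (List.range w).map (fun y => rf.getD y 0 - rs.getD y 0)
    if ds.sum ≠ 0 then false
    else bLoop w rest (List.zipWith (· + ·) col ds)

def hasSameSums_alt (firstM : List (List Int)) (secondM : List (List Int)) : Bool :=
  if firstM.length ≠ secondM.length then false
  else if firstM.headI.length ≠ secondM.headI.length then false
  else bLoop firstM.headI.length (firstM.zip secondM) (List.replicate firstM.headI.length 0)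

-- ===== PRECONDITION & SPEC =====
-- Pre_ excludes exactly the inputs that can make A raise IndexError: equal-length inputs that
-- are empty, or (when the leading width guards pass) contain a row shorter than the first row;
-- on a few such jagged inputs A still returns False through its early exit (see cites).
def Pre_hasSameSums (firstM : List (List Int)) (secondM : List (List Int)) : Prop :=
  firstM.length = secondM.length →
    (firstM ≠ [] ∧ (firstM.headI.length = secondM.headI.length →
      ((∀ r ∈ firstM, firstM.headI.length ≤ r.length) ∧
       (∀ r ∈ secondM, firstM.headI.length ≤ r.length))))
instance (firstM : List (List Int)) (secondM : List (List Int)) : Decidable (Pre_hasSameSums firstM secondM) := by unfold Pre_hasSameSums; infer_instance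
def pvWitness_hasSameSums : List (List Int) × List (List Int) := ([[1, 2], [3, 4]], [[2, 1], [4, 3]])

def Spec_hasSameSums (firstM : List (List Int)) (secondM : List (List Int)) (out : Bool) : Prop := out = hasSameSums_alt firstM secondM
instance (firstM : List (List Int)) (secondM : List (List Int)) (out : Bool) : Decidable (Spec_hasSameSums firstM secondM out) := by unfold Spec_hasSameSums; infer_instance

-- ===== CLAIM (what is proved, stated in full; the proofs are below) =====
def Claim_equal_hasSameSums : Prop := ∀ (firstM : List (List Int)) (secondM : List (List Int)), Dom_hasSameSums firstM secondM → Pre_hasSameSums firstM secondM → Spec_hasSameSums firstM secondM (hasSameSums firstM secondM)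

-- ===== LEMMAS AND PROOFS =====

theorem pair_foldl_split {α : Type} (l : List α) (f g : α → Int) (a b : Int) :
    l.foldl (fun acc y => (acc.1 + f y, acc.2 + g y)) (a, b)
      = (l.foldl (fun s y => s + f y) a, l.foldl (fun s y => s + g y) b) := by
  induction l generalizing a b with
  | nil => rfl
  | cons h t ih => simpa using ih (a + f h) (b + g h)

theorem foldl_add_eq_sum {α : Type} (l : List α) (f : α → Int) (a : Int) :
    l.foldl (fun s y => s + f y) a = a + (l.map f).sum := by
  induction l generalizing a with
  | nil => simp
  | cons h t ih => simp [ih, add_assoc]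

theorem getD_lt {α : Type} (l : List α) (d : α) (i : Nat) (h : i < l.length) :
    l.getD i d = l[i] := by
  rw [List.getD_eq_getElem?_getD, List.getElem?_eq_getElem h]
  rfl

theorem all_congr' {α : Type} (l : List α) (p q : α → Bool) (h : ∀ x ∈ l, p x = q x) :
    l.all p = l.all q := by
  induction l with
  | nil => rfl
  | cons a t ih =>
    simp only [List.all_cons, h a (by simp)]
    rw [ih (fun x hx => h x (by simp [hx]))]

theorem sum_map_sub {α : Type} (l : List α) (f g : α → Int) :
    (l.map (fun x => f x - g x)).sum = (l.map f).sum - (l.map g).sum := by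
  induction l with
  | nil => simp
  | cons h t ih => simp [ih]; ring

-- B's loop, characterised: all row-difference sums are zero and every final column residual is zero.
theorem bLoop_eq (w : Nat) :
    ∀ (pairs : List (List Int × List Int)) (col : List Int), col.length = w →
      bLoop w pairs col
        = ((pairs.all (fun p =>
              ((List.range w).map (fun y => p.1.getD y 0 - p.2.getD y 0)).sum == 0))
           && ((List.range w).all (fun y =>
              (col.getD y 0 + (pairs.map (fun p => p.1.getD y 0 - p.2.getD y 0)).sum) == 0))) := by
  intro pairs
  induction pairs with
  | nil =>
    intro col hcol
    simp only [bLoop, List.all_nil, Bool.true_and, List.map_nil, List.sum_nil, add_zero]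
    apply Bool.eq_iff_iff.mpr
    simp only [List.all_eq_true, beq_iff_eq, List.mem_range]
    constructor
    · intro h y hy
      rw [getD_lt _ _ _ (by omega)]
      exact h _ (List.getElem_mem _)
    · intro h c hc
      obtain ⟨i, hi, rfl⟩ := List.mem_iff_getElem.mp hc
      have := h i (by omega)
      rwa [getD_lt _ _ _ hi] at this
  | cons p rest ih =>
    intro col hcol
    obtain ⟨rf, rs⟩ := p
    simp only [bLoop]
    by_cases hz : ((List.range w).map (fun y => rf.getD y 0 - rs.getD y 0)).sum = 0
    · rw [if_neg (by simpa using hz)]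
      have hlen : (List.zipWith (· + ·) col ((List.range w).map (fun y => rf.getD y 0 - rs.getD y 0))).length = w := by
        simp [hcol]
      rw [ih _ hlen]
      simp only [List.all_cons, List.map_cons, List.sum_cons]
      have ht : (((List.range w).map (fun y => rf.getD y 0 - rs.getD y 0)).sum == 0) = true := by simpa using hz
      rw [ht, Bool.true_and]
      congr 1
      apply all_congr'
      intro y hy
      have hyw : y < w := List.mem_range.mp hy
      have hget : (List.zipWith (· + ·) col ((List.range w).map (fun y => rf.getD y 0 - rs.getD y 0))).getD y 0
          = col.getD y 0 + (rf.getD y 0 - rs.getD y 0) := by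
        rw [getD_lt _ _ _ (by simp [hcol]; omega)]
        simp only [List.getElem_zipWith, List.getElem_map, List.getElem_range]
        rw [getD_lt _ _ _ (by omega : y < col.length)]
      rw [hget]
      congr 1
      ring
    · rw [if_pos (by simpa using hz)]
      have hf : (((List.range w).map (fun y => rf.getD y 0 - rs.getD y 0)).sum == 0) = false := by
        simpa using hz
      simp only [List.all_cons, hf, Bool.false_and]

-- zip of equal-length lists, enumerated by index.
theorem zip_all_eq (fM sM : List (List Int)) (hlen : fM.length = sM.length) (q : List Int × List Int → Bool) :
    (fM.zip sM).all q = (List.range fM.length).all (fun x => q (fM.getD x [], sM.getD x [])) := by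
  apply Bool.eq_iff_iff.mpr
  simp only [List.all_eq_true, List.mem_range]
  constructor
  · intro h x hx
    have hx' : x < sM.length := by omega
    rw [getD_lt _ _ _ hx, getD_lt _ _ _ hx']
    have hm : (fM[x], sM[x]) ∈ fM.zip sM := by
      rw [List.mem_iff_getElem]
      exact ⟨x, by rw [List.length_zip]; omega, by simp⟩
    exact h _ hm
  · intro h p hp
    rw [List.mem_iff_getElem] at hp
    obtain ⟨i, hi, rfl⟩ := hp
    have hif : i < fM.length := by simp at hi; omega
    have his : i < sM.length := by simp at hi; omega
    have := h i hif
    rw [getD_lt _ _ _ hif, getD_lt _ _ _ his] at this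
    rw [List.getElem_zip]
    exact this
  
theorem zip_map_eq (fM sM : List (List Int)) (hlen : fM.length = sM.length) (g : List Int × List Int → Int) :
    (fM.zip sM).map g = (List.range fM.length).map (fun x => g (fM.getD x [], sM.getD x [])) := by
  apply List.ext_getElem
  · simp [hlen]
  · intro i h1 h2
    have hif : i < fM.length := by simp at h1; omega
    have his : i < sM.length := by simp at h1; omega
    simp only [List.getElem_map, List.getElem_zip, List.getElem_range]
    rw [getD_lt _ _ _ hif, getD_lt _ _ _ his]

-- ===== VERDICT (by name: the statement is the Claim_ definition above) =====
theorem hasSameSums_spec : Claim_equal_hasSameSums := by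
  intro firstM secondM _ _
  unfold Spec_hasSameSums
  by_cases hlen : firstM.length = secondM.length
  · by_cases hwid : firstM.headI.length = secondM.headI.length
    · simp only [hasSameSums, hasSameSums_alt,
        if_neg (show ¬(firstM.length ≠ secondM.length) from fun h => h hlen),
        if_neg (show ¬(firstM.headI.length ≠ secondM.headI.length) from fun h => h hwid)]
      set n := firstM.length with hn
      set w := firstM.headI.length with hw
      rw [bLoop_eq w _ _ (by simp),
          zip_all_eq firstM secondM hlen,
          ← hn]
      have hcolmap : ∀ y : Nat,
          ((firstM.zip secondM).map (fun p => p.1.getD y 0 - p.2.getD y 0)).sum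
            = ((List.range n).map (fun x => (firstM.getD x []).getD y 0 - (secondM.getD x []).getD y 0)).sum := by
        intro y
        rw [zip_map_eq firstM secondM hlen, hn]
      have hrows :
          ((List.range n).all (fun x =>
            let p := (List.range w).foldl
              (fun (acc : Int × Int) y => (acc.1 + (firstM.getD x []).getD y 0,
                                           acc.2 + (secondM.getD x []).getD y 0)) (0, 0)
            p.1 == p.2))
          = ((List.range n).all (fun x =>
              ((List.range w).map (fun y => (firstM.getD x []).getD y 0 - (secondM.getD x []).getD y 0)).sum == 0)) := by
        apply all_congr'
        intro x _
        simp only [pair_foldl_split, foldl_add_eq_sum, zero_add, sum_map_sub]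
        apply Bool.eq_iff_iff.mpr
        simp only [beq_iff_eq]
        omega
      have hcols :
          ((List.range w).all (fun y =>
            let p := (List.range n).foldl
              (fun (acc : Int × Int) x => (acc.1 + (firstM.getD x []).getD y 0,
                                           acc.2 + (secondM.getD x []).getD y 0)) (0, 0)
            p.1 == p.2))
          = ((List.range w).all (fun y =>
              ((List.replicate w (0 : Int)).getD y 0
                + ((firstM.zip secondM).map (fun p => p.1.getD y 0 - p.2.getD y 0)).sum) == 0)) := by
        apply all_congr'
        intro y hy
        have hyw : y < w := List.mem_range.mp hy
        rw [hcolmap y]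
        have hrep : (List.replicate w (0 : Int)).getD y 0 = 0 := by
          rw [getD_lt _ _ _ (by simpa using hyw)]
          simp
        simp only [pair_foldl_split, foldl_add_eq_sum, zero_add, sum_map_sub, hrep]
        apply Bool.eq_iff_iff.mpr
        simp only [beq_iff_eq]
        omega
      rw [hrows, hcols]
      cases hR : ((List.range n).all (fun x =>
          ((List.range w).map (fun y => (firstM.getD x []).getD y 0 - (secondM.getD x []).getD y 0)).sum == 0)) with
      | false => simp
      | true => simp
    · simp [hasSameSums, hasSameSums_alt, hlen, hwid]
  · simp [hasSameSums, hasSameSums_alt, hlen]
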